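-- pv_equiv track=rewrite | github.com/wolen02/openCVbyParallel-Computing | multprocessing/4.0 GIL.py | burn_cpu
-- ===== SOURCE A (Python) =====
-- def burn_cpu(n: int):
--
--     # 연산을 위한 변수
--     x = 0
--
--     # 작업 횟수를 계산하기 위한 변수
--     tmp_count = 0
--
--     for i in range(n):
--         x = (x * 1664525 + 1013904223) & 0xFFFFFFFF
--         x ^= (x >> 16)
--         tmp_count += 1
--     return tmp_count
-- ===== SOURCE B (Python) =====
-- def burn_cpu(n: int):
--     # Closed form: range(n) has max(n, 0) elements, so the loop's
--     # iteration counter is exactly len(range(n)); no CPU burning needed.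
--     return len(range(n))
-- ===== Notes on version B (the rewrite author's own statement) =====
-- stated objective: faster
-- what changed: Replaced the O(n) counting loop (with dead LCG arithmetic) by the closed form len(range(n)).
import Mathlib
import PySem

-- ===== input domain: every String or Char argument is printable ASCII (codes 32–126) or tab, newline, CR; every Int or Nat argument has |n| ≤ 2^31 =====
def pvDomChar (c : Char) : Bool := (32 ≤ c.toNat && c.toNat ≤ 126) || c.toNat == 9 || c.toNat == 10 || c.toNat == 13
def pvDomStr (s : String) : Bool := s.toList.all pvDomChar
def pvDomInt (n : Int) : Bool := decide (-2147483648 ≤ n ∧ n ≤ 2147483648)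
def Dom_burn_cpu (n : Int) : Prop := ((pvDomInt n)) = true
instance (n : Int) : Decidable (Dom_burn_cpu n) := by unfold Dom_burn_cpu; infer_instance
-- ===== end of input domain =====

-- B replaces A's O(n) counting loop (whose LCG arithmetic is dead work) by the
-- closed form len(range(n)); measurably faster (asymptotic).

-- ===== PORT A =====
-- literal port: for i in range(n): update x (LCG + xor-shift), tmp_count += 1; return tmp_count
def burn_cpu (n : Int) : Int :=
  let st := (PySem.List.pyRange 0 n 1).foldl
    (fun (st : Int × Int) _ =>
      let x : Int := PySem.Int.band (st.1 * 1664525 + 1013904223) 0xFFFFFFFF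
      let x : Int := PySem.Int.bxor x (x >>> (16 : Nat))
      (x, st.2 + 1))
    (0, 0)
  st.2

-- ===== PORT B =====
-- len(range(n))
def burn_cpu_alt (n : Int) : Int :=
  ((PySem.List.pyRange 0 n 1).length : Int)

-- ===== PRECONDITION & SPEC =====
def Spec_burn_cpu (n : Int) (out : Int) : Prop := out = burn_cpu_alt n
instance (n : Int) (out : Int) : Decidable (Spec_burn_cpu n out) := by unfold Spec_burn_cpu; infer_instance

-- ===== CLAIM (what is proved, stated in full; the proofs are below) =====
def Claim_equal_burn_cpu : Prop := ∀ (n : Int), Dom_burn_cpu n → Spec_burn_cpu n (burn_cpu n)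

-- ===== LEMMAS AND PROOFS =====

-- the counter component of A's fold counts the list elements
theorem burn_cpu_foldl_count (l : List Int) (x c : Int) :
    (l.foldl
      (fun (st : Int × Int) _ =>
        let x : Int := PySem.Int.band (st.1 * 1664525 + 1013904223) 0xFFFFFFFF
        let x : Int := PySem.Int.bxor x (x >>> (16 : Nat))
        (x, st.2 + 1))
      (x, c)).2 = c + l.length := by
  induction l generalizing x c with
  | nil => simp
  | cons a t ih => simp [List.foldl, ih]; omega

-- ===== VERDICT (by name: the statement is the Claim_ definition above) =====
theorem burn_cpu_spec : Claim_equal_burn_cpu := by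
  intro n _
  unfold Spec_burn_cpu burn_cpu burn_cpu_alt
  simp [burn_cpu_foldl_count]
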